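-- pv_equiv track=rewrite | github.com/ukamedodi/Python-Assignment-1---Abbrevations | mainTEST.PY | find_lowest_scored_abbreviations
-- ===== SOURCE A (Python) =====
-- def find_lowest_scored_abbreviations(scores):
--     lowest_scored_abbreviations = {}
--     for word, scores_dict in scores.items():
--         if scores_dict:  # Check if scores_dict is not empty
--             # Find the minimum score
--             min_score = min(scores_dict.values())
--
--             # Find abbreviations with the minimum score
--             min_score_abbreviations = [abbr for abbr, score in scores_dict.items() if score == min_score]
--
--             # Join multiple abbreviations with commas
--             min_score_abbreviation = ', '.join(min_score_abbreviations) if min_score_abbreviations else ' '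
--         else:
--             # If scores_dict is empty, set min_score_abbreviation to ' '
--             min_score_abbreviation = ' '
--
--         # Add the lowest scored abbreviation to the dictionary
--         lowest_scored_abbreviations[word] = min_score_abbreviation
--
--     # Return the dictionary of lowest scored abbreviations
--     return lowest_scored_abbreviations
-- ===== SOURCE B (Python) =====
-- def find_lowest_scored_abbreviations(scores):
--     result = {}
--     for word, scores_dict in scores.items():
--         if not scores_dict:
--             result[word] = ' '
--             continue
--         # Group abbreviations by score in a single pass (insertion order kept).
--         groups = {}
--         for abbr, score in scores_dict.items():
--             groups.setdefault(score, []).append(abbr)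
--         best = min(groups)
--         result[word] = ', '.join(groups[best])
--     return result
-- ===== Notes on version B (the rewrite author's own statement) =====
-- stated objective: alternative
-- what changed: B replaces A's two passes over each word's dict (min over values, then a filtering comprehension) by one grouping pass building a score->abbreviations dict and then joining the group at the minimum key; Pre_ only excludes assoc lists with duplicate inner keys, which no Python dict input can represent.
import Mathlib
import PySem

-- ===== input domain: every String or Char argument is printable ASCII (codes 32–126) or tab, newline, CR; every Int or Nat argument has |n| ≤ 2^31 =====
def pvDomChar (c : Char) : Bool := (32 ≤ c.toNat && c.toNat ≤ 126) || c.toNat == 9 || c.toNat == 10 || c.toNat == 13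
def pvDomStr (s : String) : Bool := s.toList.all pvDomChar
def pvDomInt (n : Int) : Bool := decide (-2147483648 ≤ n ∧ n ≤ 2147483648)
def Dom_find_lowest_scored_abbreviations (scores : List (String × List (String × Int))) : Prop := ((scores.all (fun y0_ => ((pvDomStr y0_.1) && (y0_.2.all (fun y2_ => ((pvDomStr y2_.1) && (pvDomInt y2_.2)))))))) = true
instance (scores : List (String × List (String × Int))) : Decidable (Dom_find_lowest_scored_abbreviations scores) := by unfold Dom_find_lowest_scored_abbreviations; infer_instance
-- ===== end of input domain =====

-- B groups each word's pairs by score in one pass (score -> abbreviations dict) and joins the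
-- group at the minimum key, instead of A's min-over-values pass followed by a filtering pass.

-- ===== PORT A =====
-- loop body of A, factored out: min over values, then filter for the minimum, then join
def pvAWordAbbr (sd : List (String × Int)) : String :=
  if sd.isEmpty then " "
  else
    let minScore := (PySem.List.min? (sd.map (·.2)) (fun x => x)).getD 0
    let mins := (sd.filter (fun p => p.2 == minScore)).map (·.1)
    if mins.isEmpty then " " else PySem.Str.join ", " mins

def find_lowest_scored_abbreviations (scores : List (String × List (String × Int))) : List (String × String) :=
  (scores.foldl (fun (acc : PySem.Dict String String) wp =>
    acc.insert wp.1 (pvAWordAbbr wp.2)) PySem.Dict.empty).items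

-- ===== PORT B =====
-- one grouping pass: groups.setdefault(score, []).append(abbr)
def pvGroupByScore (sd : List (String × Int)) : PySem.Dict Int (List String) :=
  sd.foldl (fun g p => g.modify p.2 [] (· ++ [p.1])) PySem.Dict.empty

def pvBWordAbbr (sd : List (String × Int)) : String :=
  if sd.isEmpty then " "
  else
    let g := pvGroupByScore sd
    let best := (PySem.List.min? g.keys (fun x => x)).getD 0
    PySem.Str.join ", " (g.getD best [])

def find_lowest_scored_abbreviations_alt (scores : List (String × List (String × Int))) : List (String × String) :=
  (scores.foldl (fun (acc : PySem.Dict String String) wp =>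
    acc.insert wp.1 (pvBWordAbbr wp.2)) PySem.Dict.empty).items

-- ===== PRECONDITION & SPEC =====
-- Pre_ excludes association lists whose inner lists carry a duplicate abbreviation key: the Python
-- functions receive a dict, so such duplicates collapse (last score wins) before A runs, a
-- representational corner the assoc-list ports cannot see; both Pythons still return there.
def Pre_find_lowest_scored_abbreviations (scores : List (String × List (String × Int))) : Prop :=
  ∀ p ∈ scores, (p.2.map (·.1)).Nodup
instance (scores : List (String × List (String × Int))) : Decidable (Pre_find_lowest_scored_abbreviations scores) := by unfold Pre_find_lowest_scored_abbreviations; infer_instance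

def pvWitness_find_lowest_scored_abbreviations : (List (String × List (String × Int))) :=
  [("word", [("wd", 2), ("w", 1), ("wrd", 1)]), ("empty", [])]

def Spec_find_lowest_scored_abbreviations (scores : List (String × List (String × Int))) (out : List (String × String)) : Prop := out = find_lowest_scored_abbreviations_alt scores
instance (scores : List (String × List (String × Int))) (out : List (String × String)) : Decidable (Spec_find_lowest_scored_abbreviations scores out) := by unfold Spec_find_lowest_scored_abbreviations; infer_instance

-- ===== CLAIM (what is proved, stated in full; the proofs are below) =====
def Claim_equal_find_lowest_scored_abbreviations : Prop := ∀ (scores : List (String × List (String × Int))), Dom_find_lowest_scored_abbreviations scores → Pre_find_lowest_scored_abbreviations scores → Spec_find_lowest_scored_abbreviations scores (find_lowest_scored_abbreviations scores)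

-- ===== LEMMAS AND PROOFS =====

-- the grouping fold's lookup at c collects exactly the abbreviations whose score is c, in order
theorem pvGroup_getD (sd : List (String × Int)) (g : PySem.Dict Int (List String)) (c : Int) :
    (sd.foldl (fun g p => g.modify p.2 [] (· ++ [p.1])) g).getD c []
      = g.getD c [] ++ (sd.filter (fun p => p.2 == c)).map (·.1) := by
  induction sd generalizing g with
  | nil => simp
  | cons p t ih =>
    simp only [List.foldl_cons, ih, List.filter_cons]
    rw [PySem.Dict.getD_modify]
    by_cases h : c = p.2
    · simp [h]
    · have hb : (p.2 == c) = false := by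
        simp only [beq_eq_false_iff_ne]; exact fun hh => h hh.symm
      simp [h, hb]

-- membership in the grouping fold's keys
theorem pvGroup_mem_keys (sd : List (String × Int)) (g : PySem.Dict Int (List String)) (c : Int) :
    c ∈ (sd.foldl (fun g p => g.modify p.2 [] (· ++ [p.1])) g).keys
      ↔ c ∈ g.keys ∨ c ∈ sd.map (·.2) := by
  induction sd generalizing g with
  | nil => simp
  | cons p t ih =>
    simp only [List.foldl_cons, ih, List.map_cons, List.mem_cons]
    rw [PySem.Dict.keys_modify]
    constructor
    · rintro (h | h)
      · rcases (PySem.Dict.mem_keys_insert _ _ _ _).mp h with h' | h'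
        · right; left; exact h'
        · left; exact h'
      · right; right; exact h
    · rintro (h | h | h)
      · exact Or.inl ((PySem.Dict.mem_keys_insert _ _ _ _).mpr (Or.inr h))
      · exact Or.inl ((PySem.Dict.mem_keys_insert _ _ _ _).mpr (Or.inl h))
      · exact Or.inr h

-- the minimum key of the groups dict is the minimum of the score list
theorem pvMin_keys (sd : List (String × Int)) (hne : sd ≠ []) :
    PySem.List.min? (pvGroupByScore sd).keys (fun x => x)
      = PySem.List.min? (sd.map (·.2)) (fun x => x) := by
  have hmem : ∀ c, c ∈ (pvGroupByScore sd).keys ↔ c ∈ sd.map (·.2) := by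
    intro c
    have := pvGroup_mem_keys sd PySem.Dict.empty c
    simpa [pvGroupByScore] using this
  obtain ⟨p, hp⟩ : ∃ p, p ∈ sd := by
    cases sd with | nil => exact absurd rfl hne | cons a t => exact ⟨a, List.mem_cons_self⟩
  have hk : (pvGroupByScore sd).keys ≠ [] := by
    intro h
    have hx := (hmem p.2).mpr (List.mem_map_of_mem hp)
    rw [h] at hx
    simp at hx
  have hm : sd.map (·.2) ≠ [] := by simp [hne]
  obtain ⟨m1, h1⟩ : ∃ m1, PySem.List.min? (pvGroupByScore sd).keys (fun x => x) = some m1 := by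
    cases h : PySem.List.min? (pvGroupByScore sd).keys (fun x => x) with
    | none => exact absurd ((PySem.List.min?_eq_none_iff _ _).mp h) hk
    | some m => exact ⟨m, rfl⟩
  obtain ⟨m2, h2⟩ : ∃ m2, PySem.List.min? (sd.map (·.2)) (fun x => x) = some m2 := by
    cases h : PySem.List.min? (sd.map (·.2)) (fun x => x) with
    | none => exact absurd ((PySem.List.min?_eq_none_iff _ _).mp h) hm
    | some m => exact ⟨m, rfl⟩
  have hm1 := PySem.List.min?_mem h1
  have hm2 := PySem.List.min?_mem h2
  have le12 : m1 ≤ m2 := PySem.List.min?_isMin h1 m2 ((hmem m2).mpr hm2)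
  have le21 : m2 ≤ m1 := PySem.List.min?_isMin h2 m1 ((hmem m1).mp hm1)
  rw [h1, h2, le_antisymm le12 le21]

-- per-word agreement of the two loop bodies
theorem pvWord_eq (sd : List (String × Int)) : pvAWordAbbr sd = pvBWordAbbr sd := by
  by_cases hne : sd = []
  · simp [pvAWordAbbr, pvBWordAbbr, hne]
  · have hE : sd.isEmpty = false := by simp [hne]
    unfold pvAWordAbbr pvBWordAbbr
    simp only [hE, Bool.false_eq_true, if_false]
    rw [pvMin_keys sd hne]
    have hgd : (pvGroupByScore sd).getD ((PySem.List.min? (sd.map (·.2)) (fun x => x)).getD 0) []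
        = (sd.filter (fun p => p.2 == (PySem.List.min? (sd.map (·.2)) (fun x => x)).getD 0)).map (·.1) := by
      have := pvGroup_getD sd PySem.Dict.empty ((PySem.List.min? (sd.map (·.2)) (fun x => x)).getD 0)
      simpa [pvGroupByScore] using this
    -- the filtered list is nonempty: the minimum is attained
    obtain ⟨m, hmE⟩ : ∃ m, PySem.List.min? (sd.map (·.2)) (fun x => x) = some m := by
      cases h : PySem.List.min? (sd.map (·.2)) (fun x => x) with
      | none => exact absurd ((PySem.List.min?_eq_none_iff _ _).mp h) (by simp [hne])
      | some m => exact ⟨m, rfl⟩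
    have hmem := PySem.List.min?_mem hmE
    obtain ⟨q, hq, hq2⟩ := List.mem_map.mp hmem
    have hfil : q ∈ sd.filter (fun p => p.2 == (PySem.List.min? (sd.map (·.2)) (fun x => x)).getD 0) := by
      rw [List.mem_filter]
      exact ⟨hq, by simp [hmE, hq2]⟩
    have hfne : sd.filter (fun p => p.2 == (PySem.List.min? (sd.map (·.2)) (fun x => x)).getD 0) ≠ [] :=
      List.ne_nil_of_mem hfil
    have hMins : (((sd.filter (fun p => p.2 == (PySem.List.min? (sd.map (·.2)) (fun x => x)).getD 0)).map (·.1)).isEmpty) = false := by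
      simp only [List.isEmpty_eq_false_iff, ne_eq, List.map_eq_nil_iff]
      exact hfne
    simp only [hMins, Bool.false_eq_true, if_false, hgd]

-- ===== VERDICT (by name: the statement is the Claim_ definition above) =====
theorem find_lowest_scored_abbreviations_spec : Claim_equal_find_lowest_scored_abbreviations := by
  intro scores _ _
  unfold Spec_find_lowest_scored_abbreviations
  unfold find_lowest_scored_abbreviations find_lowest_scored_abbreviations_alt
  congr 1
  apply PySem.List.foldl_congr_mem
  intro acc wp _
  rw [pvWord_eq]
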